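-- pv_equiv track=rewrite | github.com/TheLukaDragar/assigment1 | VJ_LBP_test.py | select_largest_detection
-- ===== SOURCE A (Python) =====
-- def select_largest_detection(left_ears, right_ears):
--     """
--     Selects the largest detection from the left and right ear detections.
--
--     :param left_ears: A list of bounding boxes for left ear detections
--     :param right_ears: A list of bounding boxes for right ear detections
--     :return: The largest bounding box and the side ('left' or 'right') it belongs to
--     """
--     largest_bbox = None
--     largest_area = 0
--     side = None
--
--     # Check left ears
--     for bbox in left_ears:
--         x, y, w, h = bbox
--         area = w * h
--         if area > largest_area:
--             largest_bbox = bbox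
--             largest_area = area
--             side = "left"
--
--     # Check right ears
--     for bbox in right_ears:
--         x, y, w, h = bbox
--         area = w * h
--         if area > largest_area:
--             largest_bbox = bbox
--             largest_area = area
--             side = "right"
--
--     return largest_bbox, side
-- ===== SOURCE B (Python) =====
-- def select_largest_detection(left_ears, right_ears):
--     candidates = []
--     for side, ears in (("left", left_ears), ("right", right_ears)):
--         for bbox in ears:
--             x, y, w, h = bbox
--             if w * h > 0:
--                 candidates.append((w * h, side, bbox))
--     if not candidates:
--         return None, None
--     area, side, bbox = max(candidates, key=lambda c: c[0])
--     return bbox, side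
-- ===== Notes on version B (the rewrite author's own statement) =====
-- stated objective: simpler
-- what changed: Replaces A's two stateful accumulator loops by building one combined filtered candidate list (area, side, bbox) and taking max keyed on area, relying on max's first-maximum rule for the left-first/earlier-wins tie-breaking.
import Mathlib
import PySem

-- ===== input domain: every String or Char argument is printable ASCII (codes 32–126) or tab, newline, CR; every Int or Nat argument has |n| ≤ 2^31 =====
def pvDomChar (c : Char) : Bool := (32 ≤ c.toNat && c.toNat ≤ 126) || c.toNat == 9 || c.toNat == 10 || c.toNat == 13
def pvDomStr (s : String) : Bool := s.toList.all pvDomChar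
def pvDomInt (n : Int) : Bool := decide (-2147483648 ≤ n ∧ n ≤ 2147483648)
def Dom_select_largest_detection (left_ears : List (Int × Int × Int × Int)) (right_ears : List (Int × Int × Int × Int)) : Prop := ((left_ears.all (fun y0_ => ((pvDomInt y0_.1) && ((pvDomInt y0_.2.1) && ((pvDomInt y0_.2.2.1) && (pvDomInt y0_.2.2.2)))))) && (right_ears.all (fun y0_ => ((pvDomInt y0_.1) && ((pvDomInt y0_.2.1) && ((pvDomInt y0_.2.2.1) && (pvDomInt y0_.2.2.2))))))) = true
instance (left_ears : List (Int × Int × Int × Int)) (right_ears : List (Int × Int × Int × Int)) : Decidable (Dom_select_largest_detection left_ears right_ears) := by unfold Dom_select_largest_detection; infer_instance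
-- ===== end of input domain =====

-- B replaces A's two stateful accumulator loops by one combined filtered candidate
-- list (area, side, bbox) and a first-maximum scan keyed on area (objective: simpler).
-- ===== PORT A =====
-- one iteration of A's loop body, parameterised by the side label
def pvStepA (side : String) (st : Option (Int × Int × Int × Int) × Int × Option String)
    (bbox : Int × Int × Int × Int) : Option (Int × Int × Int × Int) × Int × Option String :=
  let (_x, _y, w, h) := bbox
  let area := w * h
  if area > st.2.1 then (some bbox, area, some side) else st

def select_largest_detection (left_ears : List (Int × Int × Int × Int)) (right_ears : List (Int × Int × Int × Int)) : (Option (Int × Int × Int × Int)) × Option String :=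
  let st0 : Option (Int × Int × Int × Int) × Int × Option String := (none, 0, none)
  let st1 := left_ears.foldl (pvStepA "left") st0
  let st2 := right_ears.foldl (pvStepA "right") st1
  (st2.1, st2.2.2)

-- ===== PORT B =====
-- Source B's inner loop: append (w*h, side, bbox) for each box with positive area
def pvAddCands (side : String) (ears : List (Int × Int × Int × Int))
    (acc : List (Int × String × (Int × Int × Int × Int))) : List (Int × String × (Int × Int × Int × Int)) :=
  ears.foldl (fun acc bbox =>
    let (_x, _y, w, h) := bbox
    if w * h > 0 then acc ++ [(w * h, side, bbox)] else acc) acc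

-- Python's max(candidates, key=lambda c: c[0]): first element with maximal key
def pvMaxByArea (c : Int × String × (Int × Int × Int × Int))
    (cs : List (Int × String × (Int × Int × Int × Int))) : Int × String × (Int × Int × Int × Int) :=
  cs.foldl (fun best d => if d.1 > best.1 then d else best) c

def select_largest_detection_alt (left_ears : List (Int × Int × Int × Int)) (right_ears : List (Int × Int × Int × Int)) : (Option (Int × Int × Int × Int)) × Option String :=
  let candidates := pvAddCands "right" right_ears (pvAddCands "left" left_ears [])
  match candidates with
  | [] => (none, none)
  | c :: cs =>
    let m := pvMaxByArea c cs
    (some m.2.2, some m.2.1)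

-- ===== PRECONDITION & SPEC =====
def Spec_select_largest_detection (left_ears : List (Int × Int × Int × Int)) (right_ears : List (Int × Int × Int × Int)) (out : (Option (Int × Int × Int × Int)) × Option String) : Prop := out = select_largest_detection_alt left_ears right_ears
instance (left_ears : List (Int × Int × Int × Int)) (right_ears : List (Int × Int × Int × Int)) (out : (Option (Int × Int × Int × Int)) × Option String) : Decidable (Spec_select_largest_detection left_ears right_ears out) := by unfold Spec_select_largest_detection; infer_instance

-- ===== CLAIM (what is proved, stated in full; the proofs are below) =====
def Claim_equal_select_largest_detection : Prop := ∀ (left_ears : List (Int × Int × Int × Int)) (right_ears : List (Int × Int × Int × Int)), Dom_select_largest_detection left_ears right_ears → Spec_select_largest_detection left_ears right_ears (select_largest_detection left_ears right_ears)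

-- ===== LEMMAS AND PROOFS =====

-- abstract B-side step on A's state shape
def pvRunC (st : Option (Int × Int × Int × Int) × Int × Option String)
    (cs : List (Int × String × (Int × Int × Int × Int))) : Option (Int × Int × Int × Int) × Int × Option String :=
  cs.foldl (fun st c => if c.1 > st.2.1 then (some c.2.2, c.1, some c.2.1) else st) st

def pvCandOf (side : String) (ears : List (Int × Int × Int × Int)) : List (Int × String × (Int × Int × Int × Int)) :=
  ears.filterMap (fun b => if b.2.2.1 * b.2.2.2 > 0 then some (b.2.2.1 * b.2.2.2, side, b) else none)

theorem pvAddCands_cons (side : String) (b : Int × Int × Int × Int)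
    (ears : List (Int × Int × Int × Int)) (acc : List (Int × String × (Int × Int × Int × Int))) :
    pvAddCands side (b :: ears) acc =
      pvAddCands side ears
        (if b.2.2.1 * b.2.2.2 > 0 then acc ++ [(b.2.2.1 * b.2.2.2, side, b)] else acc) := by
  obtain ⟨x, y, w, h⟩ := b
  rfl

theorem pvAddCands_eq (side : String) (ears : List (Int × Int × Int × Int))
    (acc : List (Int × String × (Int × Int × Int × Int))) :
    pvAddCands side ears acc = acc ++ pvCandOf side ears := by
  induction ears generalizing acc with
  | nil => simp [pvAddCands, pvCandOf]
  | cons b ears ih =>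
    rw [pvAddCands_cons]
    by_cases hpos : b.2.2.1 * b.2.2.2 > 0
    · rw [if_pos hpos, ih]
      simp [pvCandOf, hpos]
    · rw [if_neg hpos, ih]
      simp [pvCandOf, hpos]

theorem pvStepA_eq (side : String) (st : Option (Int × Int × Int × Int) × Int × Option String)
    (b : Int × Int × Int × Int) :
    pvStepA side st b =
      if b.2.2.1 * b.2.2.2 > st.2.1 then (some b, b.2.2.1 * b.2.2.2, some side) else st := by
  obtain ⟨x, y, w, h⟩ := b
  rfl

theorem pvFoldA_eq (side : String) (ears : List (Int × Int × Int × Int))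
    (st : Option (Int × Int × Int × Int) × Int × Option String) (hst : 0 ≤ st.2.1) :
    ears.foldl (pvStepA side) st = pvRunC st (pvCandOf side ears) := by
  induction ears generalizing st with
  | nil => simp [pvCandOf, pvRunC]
  | cons b ears ih =>
    rw [List.foldl_cons, pvStepA_eq]
    by_cases hpos : b.2.2.1 * b.2.2.2 > 0
    · have hcand : pvCandOf side (b :: ears) =
          (b.2.2.1 * b.2.2.2, side, b) :: pvCandOf side ears := by
        simp [pvCandOf, List.filterMap_cons, hpos]
      have hrun : pvRunC st ((b.2.2.1 * b.2.2.2, side, b) :: pvCandOf side ears) =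
          pvRunC (if b.2.2.1 * b.2.2.2 > st.2.1 then (some b, b.2.2.1 * b.2.2.2, some side) else st)
            (pvCandOf side ears) := by
        simp only [pvRunC, List.foldl_cons]
      rw [hcand, hrun]
      refine ih _ ?_
      split_ifs with h
      · simpa using le_of_lt hpos
      · exact hst
    · have hcand : pvCandOf side (b :: ears) = pvCandOf side ears := by
        simp [pvCandOf, List.filterMap_cons, hpos]
      have hgt : ¬ b.2.2.1 * b.2.2.2 > st.2.1 := by omega
      rw [if_neg hgt, hcand]
      exact ih _ hst

theorem pvRunC_max (cs : List (Int × String × (Int × Int × Int × Int)))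
    (c : Int × String × (Int × Int × Int × Int)) :
    pvRunC (some c.2.2, c.1, some c.2.1) cs =
      (some (pvMaxByArea c cs).2.2, (pvMaxByArea c cs).1, some (pvMaxByArea c cs).2.1) := by
  induction cs generalizing c with
  | nil => simp [pvRunC, pvMaxByArea]
  | cons d cs ih =>
    by_cases hgt : d.1 > c.1
    · have h1 : pvRunC (some c.2.2, c.1, some c.2.1) (d :: cs) =
          pvRunC (some d.2.2, d.1, some d.2.1) cs := by
        simp only [pvRunC, List.foldl_cons]
        simp [hgt]
      have h2 : pvMaxByArea c (d :: cs) = pvMaxByArea d cs := by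
        simp only [pvMaxByArea, List.foldl_cons]
        simp [hgt]
      rw [h1, h2, ih]
    · have h1 : pvRunC (some c.2.2, c.1, some c.2.1) (d :: cs) =
          pvRunC (some c.2.2, c.1, some c.2.1) cs := by
        simp only [pvRunC, List.foldl_cons]
        simp [hgt]
      have h2 : pvMaxByArea c (d :: cs) = pvMaxByArea c cs := by
        simp only [pvMaxByArea, List.foldl_cons]
        simp [hgt]
      rw [h1, h2, ih]

theorem pvCandOf_pos (side : String) (ears : List (Int × Int × Int × Int))
    (c : Int × String × (Int × Int × Int × Int)) (hc : c ∈ pvCandOf side ears) : 0 < c.1 := by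
  simp only [pvCandOf, List.mem_filterMap] at hc
  obtain ⟨b, _, hb⟩ := hc
  by_cases hpos : b.2.2.1 * b.2.2.2 > 0 <;> simp [hpos] at hb
  cases hb; omega

theorem pvRunC_nonneg (cs : List (Int × String × (Int × Int × Int × Int)))
    (st : Option (Int × Int × Int × Int) × Int × Option String) (hst : 0 ≤ st.2.1) :
    0 ≤ (pvRunC st cs).2.1 := by
  induction cs generalizing st with
  | nil => simpa [pvRunC] using hst
  | cons d cs ih =>
    by_cases hgt : d.1 > st.2.1
    · have h1 : pvRunC st (d :: cs) = pvRunC (some d.2.2, d.1, some d.2.1) cs := by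
        simp only [pvRunC, List.foldl_cons]; simp [hgt]
      rw [h1]; exact ih _ (by simp; omega)
    · have h1 : pvRunC st (d :: cs) = pvRunC st cs := by
        simp only [pvRunC, List.foldl_cons]; simp [hgt]
      rw [h1]; exact ih _ hst

theorem pvRunC_append (cs rcs : List (Int × String × (Int × Int × Int × Int)))
    (st : Option (Int × Int × Int × Int) × Int × Option String) :
    pvRunC (pvRunC st cs) rcs = pvRunC st (cs ++ rcs) := by
  simp [pvRunC, List.foldl_append]

-- ===== VERDICT (by name: the statement is the Claim_ definition above) =====
theorem select_largest_detection_spec : Claim_equal_select_largest_detection := by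
  intro l r _
  simp only [Spec_select_largest_detection, select_largest_detection, select_largest_detection_alt]
  rw [pvAddCands_eq, pvAddCands_eq, List.nil_append]
  rw [pvFoldA_eq "left" l (none, 0, none) (by simp)]
  rw [pvFoldA_eq "right" r _ (pvRunC_nonneg _ _ (by simp))]
  rw [pvRunC_append]
  have hpos : ∀ c ∈ pvCandOf "left" l ++ pvCandOf "right" r, 0 < c.1 := by
    intro c hc
    rcases List.mem_append.mp hc with h | h
    · exact pvCandOf_pos _ _ _ h
    · exact pvCandOf_pos _ _ _ h
  cases hcs : pvCandOf "left" l ++ pvCandOf "right" r with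
  | nil => rfl
  | cons c cs' =>
    have hc : 0 < c.1 := hpos c (by rw [hcs]; simp)
    have h1 : pvRunC (none, 0, none) (c :: cs') = pvRunC (some c.2.2, c.1, some c.2.1) cs' := by
      simp only [pvRunC, List.foldl_cons]; simp [hc]
    rw [h1, pvRunC_max]
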